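-- pv_equiv track=rewrite | github.com/gibbonsjacob/auto-git-commit-message | git_diff_llm.py | preprocess_diff
-- ===== SOURCE A (Python) =====
-- def split_diff_by_file(diff_text):
--     """
--     Summary:
--         Splits a git diff into a dictionary keyed by filename.
--     Args:
--         diff_text (str): The full git diff text.
--
--     Returns:
--         dict: Dictionary mapping filenames to their individual diff text.
--     """
--
--     file_diffs = {}
--     current_file = None
--     lines = []
--
--     for line in diff_text.splitlines():
--         if line.startswith("diff --git"):
--             # Save previous file's diff
--             if current_file and lines:
--                 file_diffs[current_file] = "\n".join(lines)
--             # Extract filename (second path in diff header)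
--             parts = line.split(" ")
--             if len(parts) >= 3:
--                 # diff --git a/file b/file
--                 current_file = parts[2][2:]  # remove 'b/' prefix
--             lines = [line]
--         else:
--             lines.append(line)
--
--     # Add last file diff
--     if current_file and lines:
--         file_diffs[current_file] = "\n".join(lines)
--
--     return file_diffs
--
-- def preprocess_diff(diff_text, distracting_files=None):
--     """
--     Summary:
--         Removes distracting files from the git diff and returns filtered text.
--     Args:
--         diff_text (str): The full git diff text.
--         distracting_files (list[str], optional): List of filenames to remove. Defaults to ["pyproject.toml", "uv.lock"].
--
--     Returns:
--         tuple[str, bool]: Filtered diff text and a flag indicating if distracting files were present.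
--     """
--
--     if distracting_files is None:
--         distracting_files = ["pyproject.toml", "uv.lock"]
--
--     file_diffs = split_diff_by_file(diff_text)
--     append_note = False
--
--     # Here we remove documentation files from the git diff and simply add "and updated documentation" to the end of our commit message
--     filtered_file_diffs = {}
--     for filename, file_diff in file_diffs.items():
--         if filename in distracting_files:
--             append_note = True
--         else:
--             filtered_file_diffs[filename] = file_diff
--
--     filtered_diff_text = "\n".join(filtered_file_diffs.values())
--     return filtered_diff_text, append_note
-- ===== SOURCE B (Python) =====
-- def preprocess_diff(diff_text, distracting_files=None):
--     """Staged index-based variant: locate all 'diff --git' header positions, slice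
--     the line list into per-file chunks between consecutive headers, resolve each
--     chunk's filename from its header (malformed headers inherit the previous
--     name), then filter the chunks."""
--     if distracting_files is None:
--         distracting_files = ["pyproject.toml", "uv.lock"]
--
--     lines = diff_text.splitlines()
--     starts = [i for i, line in enumerate(lines) if line.startswith("diff --git")]
--     chunks = [lines[a:b] for a, b in zip(starts, starts[1:] + [len(lines)])]
--
--     names, cur = [], None
--     for chunk in chunks:
--         parts = chunk[0].split(" ")
--         if len(parts) >= 3:
--             cur = parts[2][2:]
--         names.append(cur)
--
--     kept = {}            # dict so duplicate filenames collapse (first position, last value)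
--     append_note = False
--     for name, chunk in zip(names, chunks):
--         if not name:
--             continue
--         if name in distracting_files:
--             append_note = True
--         else:
--             kept[name] = "\n".join(chunk)
--     return "\n".join(kept.values()), append_note
-- ===== Notes on version B (the rewrite author's own statement) =====
-- stated objective: alternative
-- what changed: B replaces A's stateful line scan that accumulates chunks into an unfiltered dict plus a second filter pass by a staged index computation: it first lists the positions of all header lines, resolves the filename at each header (carrying across malformed headers), then slices the line list between consecutive header positions and filters each slice directly.
import Mathlib
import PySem

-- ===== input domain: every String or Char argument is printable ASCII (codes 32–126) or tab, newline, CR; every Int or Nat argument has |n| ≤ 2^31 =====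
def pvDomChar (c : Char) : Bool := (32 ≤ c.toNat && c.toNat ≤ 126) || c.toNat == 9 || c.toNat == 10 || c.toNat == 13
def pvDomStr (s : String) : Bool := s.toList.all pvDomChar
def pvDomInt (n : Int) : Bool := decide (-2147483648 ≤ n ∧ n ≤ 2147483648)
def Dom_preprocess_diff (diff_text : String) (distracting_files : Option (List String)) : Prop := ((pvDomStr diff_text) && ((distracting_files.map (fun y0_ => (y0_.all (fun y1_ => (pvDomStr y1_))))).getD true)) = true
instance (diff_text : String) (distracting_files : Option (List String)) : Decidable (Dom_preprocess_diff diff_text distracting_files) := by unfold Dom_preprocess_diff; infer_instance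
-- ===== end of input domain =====

-- B replaces A's stateful line scan (accumulate chunks into an unfiltered dict, then a
-- second filter pass) by a staged index computation: list the header positions, slice the
-- line list between consecutive headers, resolve each chunk's filename, filter the chunks.

-- ===== PORT A =====
-- Python truthiness of `current_file` (None or a string): non-None and non-empty.
def pv_truthy (cf : Option String) : Bool :=
  match cf with | none => false | some s => decide (s ≠ "")

-- one iteration of the `for line in diff_text.splitlines()` loop of split_diff_by_file
def pv_split_step (st : PySem.Dict String String × Option String × List String)
    (line : String) : PySem.Dict String String × Option String × List String :=
  let fd := st.1
  let cf := st.2.1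
  let lns := st.2.2
  if PySem.Str.startswith line "diff --git" then
    let fd' := if pv_truthy cf && !lns.isEmpty then
        fd.insert (cf.getD "") (PySem.Str.join "\n" lns) else fd
    -- sep " " is nonempty, so split? is always `some`
    let parts := (PySem.Str.split? line " ").getD []
    let cf' := if 3 ≤ parts.length then
        some (PySem.Str.slice (parts.getD 2 "") (some 2) none) else cf
    (fd', cf', [line])
  else
    (fd, cf, lns ++ [line])

def pv_split_diff_by_file (diff_text : String) : PySem.Dict String String :=
  let st := (PySem.Str.splitlines diff_text).foldl pv_split_step (PySem.Dict.empty, none, [])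
  if pv_truthy st.2.1 && !st.2.2.isEmpty then
    st.1.insert (st.2.1.getD "") (PySem.Str.join "\n" st.2.2)
  else st.1

def preprocess_diff (diff_text : String) (distracting_files : Option (List String)) : String × Bool :=
  let df := distracting_files.getD ["pyproject.toml", "uv.lock"]
  let file_diffs := pv_split_diff_by_file diff_text
  let r := file_diffs.items.foldl
    (fun (acc : PySem.Dict String String × Bool) p =>
      if p.1 ∈ df then (acc.1, true) else (acc.1.insert p.1 p.2, acc.2))
    (PySem.Dict.empty, false)
  (PySem.Str.join "\n" r.1.values, r.2)

-- ===== PORT B =====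
def preprocess_diff_alt (diff_text : String) (distracting_files : Option (List String)) : String × Bool :=
  let df := distracting_files.getD ["pyproject.toml", "uv.lock"]
  let lines := PySem.Str.splitlines diff_text
  -- starts = [i for i, line in enumerate(lines) if line.startswith("diff --git")]
  let starts := (PySem.List.enumerate lines).filterMap
      (fun p => if PySem.Str.startswith p.2 "diff --git" then some p.1 else none)
  -- chunks = [lines[a:b] for a, b in zip(starts, starts[1:] + [len(lines)])]
  let chunks := (starts.zip (PySem.List.slice starts (some 1) none ++ [(lines.length : Int)])).map
      (fun ab => PySem.List.slice lines (some ab.1) (some ab.2))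
  -- names loop (chunk[0] is in range: every chunk starts at a header line)
  let nst := chunks.foldl
      (fun (st : List (Option String) × Option String) chunk =>
        let parts := (PySem.Str.split? ((PySem.List.pyGet? chunk 0).getD "") " ").getD []
        let cur := if 3 ≤ parts.length then
            some (PySem.Str.slice (parts.getD 2 "") (some 2) none) else st.2
        (st.1 ++ [cur], cur)) ([], none)
  -- filter loop over zip(names, chunks)
  let r := (nst.1.zip chunks).foldl
      (fun (acc : PySem.Dict String String × Bool) p =>
        match p.1 with
        | none => acc
        | some name =>
          if name = "" then acc
          else if name ∈ df then (acc.1, true)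
          else (acc.1.insert name (PySem.Str.join "\n" p.2), acc.2))
      (PySem.Dict.empty, false)
  (PySem.Str.join "\n" r.1.values, r.2)

-- ===== PRECONDITION & SPEC =====
def Spec_preprocess_diff (diff_text : String) (distracting_files : Option (List String)) (out : String × Bool) : Prop := out = preprocess_diff_alt diff_text distracting_files
instance (diff_text : String) (distracting_files : Option (List String)) (out : String × Bool) : Decidable (Spec_preprocess_diff diff_text distracting_files out) := by unfold Spec_preprocess_diff; infer_instance

-- ===== CLAIM (what is proved, stated in full; the proofs are below) =====
def Claim_equal_preprocess_diff : Prop := ∀ (diff_text : String) (distracting_files : Option (List String)), Dom_preprocess_diff diff_text distracting_files → Spec_preprocess_diff diff_text distracting_files (preprocess_diff diff_text distracting_files)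

-- ===== LEMMAS AND PROOFS =====

-- abbreviations for the header predicate
def pvHdr (l : String) : Bool := PySem.Str.startswith l "diff --git"
def pvNH (l : String) : Bool := !pvHdr l

lemma pv_dropWhile_head {α : Type} (p : α → Bool) (l : List α) (x : α) (xs : List α)
    (h : l.dropWhile p = x :: xs) : p x = false := by
  induction l with
  | nil => simp at h
  | cons a t ih =>
    by_cases hp : p a = true
    · rw [List.dropWhile_cons_of_pos hp] at h; exact ih h
    · rw [List.dropWhile_cons_of_neg hp] at h
      cases h; simpa using hp

-- recursive section splitter: input begins with a header line (or is empty)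
def pvSections : List String → List (List String)
  | [] => []
  | h :: t => (h :: t.takeWhile pvNH) :: pvSections (t.dropWhile pvNH)
termination_by ls => ls.length
decreasing_by
  simp only [List.length_cons]
  exact Nat.lt_succ_of_le (List.length_dropWhile_le _ _)

-- filename resolution at one header line (A's and B's shared parsing expression)
def pvParse (cur : Option String) (h : String) : Option String :=
  let parts := (PySem.Str.split? h " ").getD []
  if 3 ≤ parts.length then some (PySem.Str.slice (parts.getD 2 "") (some 2) none) else cur

def pvResolve (cur : Option String) : List (List String) → List (Option String × List String)
  | [] => []
  | s :: ss =>
    let c := pvParse cur ((PySem.List.pyGet? s 0).getD "")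
    (c, s) :: pvResolve c ss

-- the shared filter step (B's inner loop body)
def pvStepG (df : List String) (acc : PySem.Dict String String × Bool)
    (p : Option String × List String) : PySem.Dict String String × Bool :=
  match p.1 with
  | none => acc
  | some name =>
    if name = "" then acc
    else if name ∈ df then (acc.1, true)
    else (acc.1.insert name (PySem.Str.join "\n" p.2), acc.2)

-- ---- A's second (filter) pass, and pushing it through Dict.insert ----
def pvFStep (df : List String) (acc : PySem.Dict String String × Bool)
    (p : String × String) : PySem.Dict String String × Bool :=
  if p.1 ∈ df then (acc.1, true) else (acc.1.insert p.1 p.2, acc.2)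

def pvF (df : List String) (l : List (String × String))
    (acc : PySem.Dict String String × Bool) : PySem.Dict String String × Bool :=
  l.foldl (pvFStep df) acc

lemma pv_insert_over (d : PySem.Dict String String) (k w v q1 q2 : String)
    (hq : q1 ≠ k) :
    ((d.insert k w).insert q1 q2).insert k v = (d.insert k v).insert q1 q2 := by
  apply PySem.Dict.ext
  have hcq : ∀ (x : String), ((d.insert k x).contains q1) = d.contains q1 := by
    intro x; simp [PySem.Dict.contains_insert, hq]
  have hnotk : d.contains k = false → ∀ p ∈ d.items, p.1 ≠ k := by
    intro h p hp hpk
    have : d.contains k = true := by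
      simp only [PySem.Dict.contains, List.any_eq_true]
      exact ⟨p, hp, by simp [hpk]⟩
    simp [this] at h
  by_cases hk : d.contains k = true
  · have hck2 : ((d.insert k w).insert q1 q2).contains k = true := by
      simp [PySem.Dict.contains_insert]
    by_cases hq1 : d.contains q1 = true
    · simp only [PySem.Dict.items_insert, hcq, hck2, hk, hq1, if_true, List.map_map]
      apply List.map_congr_left
      intro p _
      by_cases h1 : p.1 = k
      · simp [Function.comp, h1, Ne.symm hq]
      · by_cases h2 : p.1 = q1 <;> simp [Function.comp, h1, h2, hq]
    · simp only [PySem.Dict.items_insert, hcq, hck2, hk, hq1, if_true, Bool.false_eq_true,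
        if_false, List.map_append, List.map_map]
      congr 1
      · apply List.map_congr_left
        intro p _
        by_cases h1 : p.1 = k <;> simp [Function.comp, h1]
      · simp [hq]
  · have hck2 : ((d.insert k w).insert q1 q2).contains k = true := by
      simp [PySem.Dict.contains_insert]
    have hid : ∀ (x : String), List.map (fun p => if (p.1 == k) = true then (k, x) else p) d.items = d.items := by
      intro x
      conv_rhs => rw [← List.map_id d.items]
      apply List.map_congr_left
      intro p hp
      simp [hnotk (by simpa using hk) p hp]
    by_cases hq1 : d.contains q1 = true
    · simp only [PySem.Dict.items_insert, hcq, hck2, hk, hq1, if_true, Bool.false_eq_true,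
        if_false, List.map_append, List.map_map]
      simp only [hid, List.map_cons, List.map_nil]
      congr 1
      · apply List.map_congr_left
        intro p hp
        by_cases h2 : p.1 = q1 <;> simp [h2, hq, hnotk (by simpa using hk) p hp]
      · simp [hq, Ne.symm hq]
    · simp only [PySem.Dict.items_insert, hcq, hck2, hk, hq1, Bool.false_eq_true, if_false,
        if_true, List.map_append, List.map_map, hid]
      simp [hid, hq]

lemma pvF_snd_true (df : List String) (l : List (String × String))
    (d : PySem.Dict String String) :
    (pvF df l (d, true)).2 = true := by
  induction l generalizing d with
  | nil => rfl
  | cons p rest ih =>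
    simp only [pvF, List.foldl_cons, pvFStep]
    split_ifs <;> exact ih _

lemma pv_INS (df : List String) (rest : List (String × String))
    (k v w : String) (hk : k ∉ rest.map Prod.fst) :
    ∀ (d : PySem.Dict String String) (b : Bool),
    pvF df rest (d.insert k v, b)
      = ((pvF df rest (d.insert k w, b)).1.insert k v,
         (pvF df rest (d.insert k w, b)).2) := by
  induction rest with
  | nil =>
    intro d b
    simp [pvF, PySem.Dict.insert_insert_self]
  | cons q rest ih =>
    intro d b
    have hq : q.1 ≠ k := by simp at hk; exact fun h => hk.1 h.symm |>.elim
    have hk' : k ∉ rest.map Prod.fst := by simp at hk ⊢; exact fun x hx => hk.2 x hx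
    by_cases hdf : q.1 ∈ df
    · simp only [pvF, List.foldl_cons, pvFStep, hdf, if_pos]
      exact ih hk' d true
    · simp only [pvF, List.foldl_cons, pvFStep, hdf, if_neg, not_false_iff]
      rw [← pv_insert_over d k w v q.1 q.2 hq]
      have h2 := ih hk' ((d.insert k w).insert q.1 q.2) b
      rw [pv_insert_over d k w w q.1 q.2 hq] at h2
      exact h2

lemma pvF_map_replace (df : List String) (k v : String) :
    ∀ (l : List (String × String)), k ∈ l.map Prod.fst → (l.map Prod.fst).Nodup →
    ∀ acc, pvF df (l.map (fun p => if (p.1 == k) = true then (k, v) else p)) acc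
      = pvFStep df (pvF df l acc) (k, v) := by
  intro l
  induction l with
  | nil => simp
  | cons p rest ih =>
    intro hmem hnd acc
    by_cases h1 : p.1 = k
    · have hk' : k ∉ rest.map Prod.fst := by
        rw [List.map_cons] at hnd
        exact h1 ▸ (List.nodup_cons.mp hnd).1
      have hrest : rest.map (fun p => if (p.1 == k) = true then (k, v) else p) = rest := by
        conv_rhs => rw [← List.map_id rest]
        apply List.map_congr_left
        intro q hq
        have : q.1 ≠ k := fun h => hk' (by simpa [← h] using List.mem_map_of_mem (f := Prod.fst) hq)
        simp [this]
      simp only [List.map_cons, h1, beq_self_eq_true, if_true, pvF, List.foldl_cons, hrest]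
      by_cases hdf : k ∈ df
      · simp only [pvFStep, h1, hdf, if_pos]
        have hs := pvF_snd_true df rest (acc.1)
        exact Prod.ext rfl hs
      · simp only [pvFStep, h1, hdf, if_neg, not_false_iff]
        exact pv_INS df rest k v p.2 hk' acc.1 acc.2
    · have hmem' : k ∈ rest.map Prod.fst := by simp at hmem ⊢; rcases hmem with h|h; exact (h1 h.symm).elim; exact h
      have hnd' : (rest.map Prod.fst).Nodup := by simp at hnd ⊢; exact hnd.2
      simp only [List.map_cons, beq_iff_eq, h1, if_false, pvF, List.foldl_cons]
      simpa [pvF, beq_iff_eq] using ih hmem' hnd' (pvFStep df acc p)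

lemma pvF_insert (df : List String) (d : PySem.Dict String String)
    (hnd : d.keys.Nodup) (k v : String) (acc : PySem.Dict String String × Bool) :
    pvF df (d.insert k v).items acc = pvFStep df (pvF df d.items acc) (k, v) := by
  by_cases hk : d.contains k = true
  · rw [PySem.Dict.items_insert, if_pos hk]
    have hmem : k ∈ d.items.map Prod.fst := by
      simpa [PySem.Dict.keys] using (PySem.Dict.contains_iff_mem_keys d k).mp hk
    have hnd' : (d.items.map Prod.fst).Nodup := by simpa [PySem.Dict.keys] using hnd
    exact pvF_map_replace df k v d.items hmem hnd' acc
  · rw [PySem.Dict.items_insert, if_neg hk]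
    simp [pvF, List.foldl_append]

-- ---- the fused scan (proof intermediate): A's scan with the filter applied at flush ----
def pv_finish (df : List String) (kn : PySem.Dict String String × Bool)
    (cur : Option String) (chunk : List String) : PySem.Dict String String × Bool :=
  if pv_truthy cur && !chunk.isEmpty then
    pvFStep df kn (cur.getD "", PySem.Str.join "\n" chunk)
  else kn

def pv_fstep (df : List String)
    (st : (PySem.Dict String String × Bool) × Option String × List String)
    (line : String) : (PySem.Dict String String × Bool) × Option String × List String :=
  if pvHdr line then
    (pv_finish df st.1 st.2.1 st.2.2, pvParse st.2.1 line, [line])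
  else (st.1, st.2.1, st.2.2 ++ [line])

lemma pv_stepB_eq (df : List String) (fd : PySem.Dict String String)
    (cf : Option String) (lns : List String) (line : String) (hnd : fd.keys.Nodup) :
    pv_fstep df (pvF df fd.items (PySem.Dict.empty, false), cf, lns) line
      = (pvF df (pv_split_step (fd, cf, lns) line).1.items (PySem.Dict.empty, false),
         (pv_split_step (fd, cf, lns) line).2) := by
  by_cases hs : pvHdr line = true
  · simp only [pv_fstep, pv_split_step, pv_finish, pvParse, pvHdr] at hs ⊢
    simp only [hs, if_true]
    by_cases hc : (pv_truthy cf && !lns.isEmpty) = true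
    · rw [if_pos hc, if_pos hc, ← pvF_insert df fd hnd _ _ _]
    · rw [if_neg hc, if_neg hc]
  · simp only [pv_fstep, pv_split_step, pvHdr] at hs ⊢
    simp only [hs, Bool.false_eq_true, if_false]

lemma pv_stepA_nodup (fd : PySem.Dict String String) (cf : Option String)
    (lns : List String) (line : String) (hnd : fd.keys.Nodup) :
    (pv_split_step (fd, cf, lns) line).1.keys.Nodup := by
  simp only [pv_split_step]
  split_ifs <;> first | exact PySem.Dict.nodup_keys_insert _ _ _ hnd | exact hnd

lemma pv_scan (df : List String) (lines : List String) :
    ∀ (fd : PySem.Dict String String) (cf : Option String) (lns : List String),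
    fd.keys.Nodup →
    lines.foldl (pv_fstep df) (pvF df fd.items (PySem.Dict.empty, false), cf, lns)
      = (pvF df (lines.foldl pv_split_step (fd, cf, lns)).1.items (PySem.Dict.empty, false),
         (lines.foldl pv_split_step (fd, cf, lns)).2)
    ∧ (lines.foldl pv_split_step (fd, cf, lns)).1.keys.Nodup := by
  induction lines with
  | nil => intro fd cf lns h; exact ⟨rfl, h⟩
  | cons line rest ih =>
    intro fd cf lns h
    simp only [List.foldl_cons]
    rw [pv_stepB_eq df fd cf lns line h]
    exact ih _ _ _ (pv_stepA_nodup fd cf lns line h)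

-- A's whole computation expressed via the fused scan
lemma pv_A_eq_fused (diff_text : String) (dfo : Option (List String)) :
    preprocess_diff diff_text dfo
      = (let df := dfo.getD ["pyproject.toml", "uv.lock"]
         let st := (PySem.Str.splitlines diff_text).foldl (pv_fstep df)
             ((PySem.Dict.empty, false), none, [])
         let kn := pv_finish df st.1 st.2.1 st.2.2
         (PySem.Str.join "\n" kn.1.values, kn.2)) := by
  unfold preprocess_diff pv_split_diff_by_file
  dsimp only
  obtain ⟨hmain, hnd⟩ := pv_scan (dfo.getD ["pyproject.toml", "uv.lock"])
    (PySem.Str.splitlines diff_text) PySem.Dict.empty none []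
    (PySem.Dict.nodup_keys_empty)
  rw [show pvF (dfo.getD ["pyproject.toml", "uv.lock"]) PySem.Dict.empty.items
        (PySem.Dict.empty, false) = (PySem.Dict.empty, false) from rfl] at hmain
  rw [hmain]
  simp only [pv_finish]
  by_cases hc : (pv_truthy (((PySem.Str.splitlines diff_text).foldl pv_split_step
      (PySem.Dict.empty, none, [])).2.1)
      && !((PySem.Str.splitlines diff_text).foldl pv_split_step
      (PySem.Dict.empty, none, [])).2.2.isEmpty) = true
  · rw [if_pos hc, if_pos hc, ← pvF_insert _ _ hnd]; rfl
  · rw [if_neg hc, if_neg hc]; rfl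

-- ---- from the fused scan to sections ----
def pvGo (df : List String) (kn : PySem.Dict String String × Bool)
    (cur : Option String) (acc : List String) (tail : List String) :
    PySem.Dict String String × Bool :=
  match hr : tail.dropWhile pvNH with
  | [] => pv_finish df kn cur (acc ++ tail.takeWhile pvNH)
  | hd :: t2 =>
    pvGo df (pv_finish df kn cur (acc ++ tail.takeWhile pvNH)) (pvParse cur hd) [hd] t2
termination_by tail.length
decreasing_by
  have := List.length_dropWhile_le pvNH tail
  rw [hr] at this
  simp at this
  omega

lemma pv_fstep_skip (df : List String) (ls : List String)
    (h : ∀ l ∈ ls, pvHdr l = false) :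
    ∀ kn cur acc, ls.foldl (pv_fstep df) (kn, cur, acc) = (kn, cur, acc ++ ls) := by
  induction ls with
  | nil => intro kn cur acc; simp
  | cons l rest ih =>
    intro kn cur acc
    have hl : pvHdr l = false := h l (by simp)
    simp only [List.foldl_cons, pv_fstep, hl, Bool.false_eq_true, if_false]
    rw [ih (fun x hx => h x (by simp [hx]))]
    simp

lemma pvGo_nil (df : List String) (kn : PySem.Dict String String × Bool)
    (cur : Option String) (acc tail : List String) (h : tail.dropWhile pvNH = []) :
    pvGo df kn cur acc tail = pv_finish df kn cur (acc ++ tail.takeWhile pvNH) := by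
  rw [pvGo]
  split <;> simp_all

lemma pvGo_cons (df : List String) (kn : PySem.Dict String String × Bool)
    (cur : Option String) (acc tail : List String) (hd : String) (t2 : List String)
    (h : tail.dropWhile pvNH = hd :: t2) :
    pvGo df kn cur acc tail
      = pvGo df (pv_finish df kn cur (acc ++ tail.takeWhile pvNH)) (pvParse cur hd) [hd] t2 := by
  rw [pvGo]
  split
  · simp_all
  · rename_i hd' t2' hr
    rw [h] at hr
    cases hr
    rfl

lemma pv_MAIN (df : List String) : ∀ (n : Nat) (tail : List String), tail.length ≤ n →
    ∀ kn cur acc,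
    (let st := tail.foldl (pv_fstep df) (kn, cur, acc)
     pv_finish df st.1 st.2.1 st.2.2) = pvGo df kn cur acc tail := by
  intro n
  induction n with
  | zero =>
    intro tail hlen kn cur acc
    have : tail = [] := List.length_eq_zero_iff.mp (Nat.le_zero.mp hlen)
    subst this
    simp only [List.foldl_nil]
    rw [pvGo_nil df kn cur acc [] (by simp)]
    simp
  | succ n ih =>
    intro tail hlen kn cur acc
    have hsplit : tail.takeWhile pvNH ++ tail.dropWhile pvNH = tail :=
      List.takeWhile_append_dropWhile
    have htw : ∀ l ∈ tail.takeWhile pvNH, pvHdr l = false := by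
      intro l hl
      have := List.mem_takeWhile_imp hl
      simpa [pvNH] using this
    conv_lhs => rw [← hsplit]
    rw [List.foldl_append, pv_fstep_skip df _ htw]
    cases hdw : tail.dropWhile pvNH with
    | nil =>
      simp only [List.foldl_nil]
      rw [pvGo_nil df kn cur acc tail hdw]
    | cons hd t2 =>
      have hhd : pvHdr hd = true := by
        have := pv_dropWhile_head pvNH tail hd t2 hdw
        simpa [pvNH] using this
      simp only [List.foldl_cons, pv_fstep, hhd, if_true]
      have hlen2 : t2.length ≤ n := by
        have := congrArg List.length hsplit
        rw [hdw] at this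
        simp at this
        omega
      rw [ih t2 hlen2 _ _ _]
      rw [pvGo_cons df kn cur acc tail hd t2 hdw]

lemma pv_finish_nonempty (df : List String) (kn : PySem.Dict String String × Bool)
    (cur : Option String) (hd : String) (tl : List String) :
    pv_finish df kn cur (hd :: tl) = pvStepG df kn (cur, hd :: tl) := by
  cases cur with
  | none => simp [pv_finish, pv_truthy, pvStepG]
  | some s =>
    by_cases hs : s = ""
    · simp [pv_finish, pv_truthy, pvStepG, hs]
    · simp only [pv_finish, pv_truthy, pvStepG, hs, decide_not, List.isEmpty_cons,
        Bool.not_false, Bool.and_true, Option.getD_some, pvFStep]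
      simp

lemma pvSections_cons (h : String) (t : List String) :
    pvSections (h :: t) = (h :: t.takeWhile pvNH) :: pvSections (t.dropWhile pvNH) := by
  rw [pvSections]

lemma pv_pyGet?_zero {α : Type} (x : α) (xs : List α) :
    PySem.List.pyGet? (x :: xs) 0 = some x := by
  simp [PySem.List.pyGet?, PySem.List.pyIdx?]

lemma pv_GSEC (df : List String) : ∀ (n : Nat) (tail : List String), tail.length ≤ n →
    ∀ (hd : String) (kn : PySem.Dict String String × Bool) (cur : Option String),
    pvGo df kn (pvParse cur hd) [hd] tail
      = (pvResolve cur (pvSections (hd :: tail))).foldl (pvStepG df) kn := by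
  intro n
  induction n with
  | zero =>
    intro tail hlen hd kn cur
    have : tail = [] := List.length_eq_zero_iff.mp (Nat.le_zero.mp hlen)
    subst this
    rw [pvGo_nil df kn (pvParse cur hd) [hd] [] (by simp)]
    rw [pvSections_cons]
    simp only [List.takeWhile_nil, List.dropWhile_nil, pvSections, pvResolve,
      pv_pyGet?_zero, Option.getD_some, List.foldl_cons, List.foldl_nil,
      List.cons_append, List.nil_append]
    rw [pv_finish_nonempty]
  | succ n ih =>
    intro tail hlen hd kn cur
    rw [pvSections_cons]
    cases hdw : tail.dropWhile pvNH with
    | nil =>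
      rw [pvGo_nil df kn (pvParse cur hd) [hd] tail hdw]
      simp only [pvSections, pvResolve, pv_pyGet?_zero, Option.getD_some,
        List.foldl_cons, List.foldl_nil, List.cons_append, List.nil_append]
      rw [pv_finish_nonempty]
    | cons hd2 t2 =>
      rw [pvGo_cons df kn (pvParse cur hd) [hd] tail hd2 t2 hdw]
      have hlen2 : t2.length ≤ n := by
        have := congrArg List.length (List.takeWhile_append_dropWhile (p := pvNH) (l := tail))
        rw [hdw] at this
        simp at this
        omega
      rw [ih t2 hlen2 hd2 _ (pvParse cur hd)]
      simp only [pvResolve, pv_pyGet?_zero, Option.getD_some, List.foldl_cons,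
        List.cons_append, List.nil_append]
      rw [pv_finish_nonempty]

-- A = filter-fold over the resolved sections
lemma pv_A_sections (diff_text : String) (dfo : Option (List String)) :
    preprocess_diff diff_text dfo
      = (let df := dfo.getD ["pyproject.toml", "uv.lock"]
         let lines := PySem.Str.splitlines diff_text
         let kn := (pvResolve none (pvSections (lines.dropWhile pvNH))).foldl (pvStepG df)
             (PySem.Dict.empty, false)
         (PySem.Str.join "\n" kn.1.values, kn.2)) := by
  rw [pv_A_eq_fused]
  dsimp only
  rw [pv_MAIN _ (PySem.Str.splitlines diff_text).length _ le_rfl]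
  cases hdw : (PySem.Str.splitlines diff_text).dropWhile pvNH with
  | nil =>
    rw [pvGo_nil _ _ _ _ _ hdw]
    simp [pv_finish, pv_truthy, pvSections, pvResolve]
  | cons hd t2 =>
    rw [pvGo_cons _ _ _ _ _ _ _ hdw]
    have : pv_finish (dfo.getD ["pyproject.toml", "uv.lock"]) (PySem.Dict.empty, false) none
        ([] ++ (PySem.Str.splitlines diff_text).takeWhile pvNH) = (PySem.Dict.empty, false) := by
      simp [pv_finish, pv_truthy]
    rw [this, pv_GSEC _ t2.length t2 le_rfl]

-- ---- B's index computation equals the sections ----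
def pvIdxs (ls : List String) (n : Int) : List Int :=
  (PySem.List.enumerate ls n).filterMap (fun p => if pvHdr p.2 then some p.1 else none)

lemma pv_idxs_skip (pre r : List String) (n : Int)
    (h : ∀ l ∈ pre, pvHdr l = false) :
    pvIdxs (pre ++ r) n = pvIdxs r (n + pre.length) := by
  unfold pvIdxs
  rw [PySem.List.enumerate_append, List.filterMap_append]
  have : (PySem.List.enumerate pre n).filterMap (fun p => if pvHdr p.2 then some p.1 else none) = [] := by
    rw [List.filterMap_eq_nil_iff]
    intro p hp
    have h2 : p.2 ∈ pre := by
      have := PySem.List.map_snd_enumerate pre n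
      exact this ▸ List.mem_map_of_mem (f := Prod.snd) hp
    simp [h p.2 h2]
  rw [this, List.nil_append]

def pvIdxN (ls : List String) (n : Nat) : List Nat :=
  match hr : ls.dropWhile pvNH with
  | [] => []
  | _ :: t =>
    (n + (ls.takeWhile pvNH).length) :: pvIdxN t (n + (ls.takeWhile pvNH).length + 1)
termination_by ls.length
decreasing_by
  have := List.length_dropWhile_le pvNH ls
  rw [hr] at this
  simp at this
  omega

lemma pvIdxN_nil (ls : List String) (n : Nat) (h : ls.dropWhile pvNH = []) :
    pvIdxN ls n = [] := by
  rw [pvIdxN]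
  split <;> simp_all

lemma pvIdxN_cons (ls : List String) (n : Nat) (hd : String) (t : List String)
    (h : ls.dropWhile pvNH = hd :: t) :
    pvIdxN ls n = (n + (ls.takeWhile pvNH).length) :: pvIdxN t (n + (ls.takeWhile pvNH).length + 1) := by
  rw [pvIdxN]
  split
  · simp_all
  · rename_i hd' t' hr
    rw [h] at hr
    cases hr
    rfl

lemma pv_idxs_nil (n : Int) : pvIdxs [] n = [] := by
  simp [pvIdxs, PySem.List.enumerate]

lemma pv_idxs_cons (hd : String) (t : List String) (n : Int) (h : pvHdr hd = true) :
    pvIdxs (hd :: t) n = n :: pvIdxs t (n + 1) := by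
  unfold pvIdxs
  rw [PySem.List.enumerate_cons]
  simp [h]

lemma pv_idxN_cast (ls : List String) : ∀ (N : Nat), ls.length ≤ N → ∀ (n : Nat),
    pvIdxs ls (n : Int) = (pvIdxN ls n).map (fun (k : Nat) => (k : Int)) := by
  intro N
  induction N generalizing ls with
  | zero =>
    intro hlen n
    have : ls = [] := List.length_eq_zero_iff.mp (Nat.le_zero.mp hlen)
    subst this
    rw [pv_idxs_nil, pvIdxN_nil _ _ (by simp)]
    rfl
  | succ N ih =>
    intro hlen n
    have hsplit : ls.takeWhile pvNH ++ ls.dropWhile pvNH = ls :=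
      List.takeWhile_append_dropWhile
    have htw : ∀ l ∈ ls.takeWhile pvNH, pvHdr l = false := by
      intro l hl
      simpa [pvNH] using List.mem_takeWhile_imp hl
    conv_lhs => rw [← hsplit]
    rw [pv_idxs_skip _ _ _ htw]
    cases hdw : ls.dropWhile pvNH with
    | nil =>
      rw [pv_idxs_nil, pvIdxN_nil _ _ hdw]
      rfl
    | cons hd t =>
      have hhd : pvHdr hd = true := by
        simpa [pvNH] using pv_dropWhile_head pvNH ls hd t hdw
      rw [pv_idxs_cons hd t _ hhd, pvIdxN_cons ls n hd t hdw]
      have hlen2 : t.length ≤ N := by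
        have := congrArg List.length hsplit
        rw [hdw] at this
        simp at this
        omega
      have h1 : ((n : Int) + ((ls.takeWhile pvNH).length : Int))
          = ((n + (ls.takeWhile pvNH).length : Nat) : Int) := by push_cast; ring
      have h2 : (((n + (ls.takeWhile pvNH).length : Nat) : Int) + 1)
          = ((n + (ls.takeWhile pvNH).length + 1 : Nat) : Int) := by push_cast; ring
      rw [h1, h2, ih t hlen2 _]
      rfl

lemma pv_idxN_shift (ls : List String) (n : Nat) :
    pvIdxN ls n = pvIdxN (ls.dropWhile pvNH) (n + (ls.takeWhile pvNH).length) := by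
  cases hdw : ls.dropWhile pvNH with
  | nil => rw [pvIdxN_nil _ _ hdw, pvIdxN_nil _ _ (by simp)]
  | cons hd t =>
    have hhd : pvHdr hd = true := by
      simpa [pvNH] using pv_dropWhile_head pvNH ls hd t hdw
    have hnh : pvNH hd = false := by simp [pvNH, hhd]
    rw [pvIdxN_cons ls n hd t hdw,
        pvIdxN_cons (hd :: t) (n + (ls.takeWhile pvNH).length) hd t
          (by rw [List.dropWhile_cons_of_neg (by simp [hnh])])]
    simp [List.takeWhile_cons_of_neg (by simp [hnh] : ¬ pvNH hd = true)]

lemma pvIdxN_hdr_cons (hd : String) (t : List String) (n : Nat) (h : pvHdr hd = true) :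
    pvIdxN (hd :: t) n = n :: pvIdxN t (n + 1) := by
  have hnh : ¬ pvNH hd = true := by simp [pvNH, h]
  rw [pvIdxN_cons (hd :: t) n hd t (List.dropWhile_cons_of_neg hnh)]
  rw [List.takeWhile_cons_of_neg hnh]
  simp

lemma pv_SEC (full : List String) : ∀ (N : Nat) (t : List String), t.length ≤ N →
    ∀ (hd : String) (n : Nat), pvHdr hd = true → full.drop n = hd :: t →
    (((pvIdxN (hd :: t) n).map (fun (k : Nat) => (k : Int))).zip
        (((pvIdxN (hd :: t) n).map (fun (k : Nat) => (k : Int))).tail ++ [(full.length : Int)])).map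
      (fun ab => PySem.List.slice full (some ab.1) (some ab.2))
      = pvSections (hd :: t) := by
  have base : ∀ (t : List String), t.dropWhile pvNH = [] →
      ∀ (hd : String) (n : Nat), pvHdr hd = true → full.drop n = hd :: t →
      (((pvIdxN (hd :: t) n).map (fun (k : Nat) => (k : Int))).zip
          (((pvIdxN (hd :: t) n).map (fun (k : Nat) => (k : Int))).tail ++ [(full.length : Int)])).map
        (fun ab => PySem.List.slice full (some ab.1) (some ab.2))
        = pvSections (hd :: t) := by
    intro t hdw hd n hhd hdrop
    rw [pvIdxN_hdr_cons hd t n hhd, pvIdxN_nil t (n + 1) hdw]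
    have htw : t.takeWhile pvNH = t := by
      have := List.takeWhile_append_dropWhile (p := pvNH) (l := t)
      rw [hdw, List.append_nil] at this
      exact this
    rw [pvSections_cons, hdw, htw]
    simp only [pvSections, List.map_cons, List.map_nil, List.tail_cons, List.nil_append,
      List.zip_cons_cons, List.zip_nil_right]
    rw [PySem.List.slice_natCast]
    have hlen : (full.drop n).length = full.length - n := List.length_drop
    rw [List.take_of_length_le (by rw [hlen]), hdrop]
  intro N
  induction N with
  | zero =>
    intro t hlen hd n hhd hdrop
    have : t = [] := List.length_eq_zero_iff.mp (Nat.le_zero.mp hlen)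
    subst this
    exact base [] (by simp) hd n hhd hdrop
  | succ N ih =>
    intro t hlen hd n hhd hdrop
    cases hdw : t.dropWhile pvNH with
    | nil => exact base t hdw hd n hhd hdrop
    | cons hd2 t2 =>
      have hhd2 : pvHdr hd2 = true := by
        simpa [pvNH] using pv_dropWhile_head pvNH t hd2 t2 hdw
      have hsplit : t.takeWhile pvNH ++ t.dropWhile pvNH = t :=
        List.takeWhile_append_dropWhile
      have ht : t.takeWhile pvNH ++ (hd2 :: t2) = t := by rw [← hdw]; exact hsplit
      have hlen2 : t2.length ≤ N := by
        have := congrArg List.length ht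
        simp at this
        omega
      have hdropt : full.drop (n + 1) = t := by
        have h1 := congrArg (List.drop 1) hdrop
        rw [List.drop_drop] at h1
        simpa using h1
      have hdrop2 : full.drop (n + 1 + (t.takeWhile pvNH).length) = hd2 :: t2 := by
        have h1 := congrArg (List.drop (t.takeWhile pvNH).length) hdropt
        rw [List.drop_drop] at h1
        have h2 := List.drop_left (l₁ := t.takeWhile pvNH) (l₂ := hd2 :: t2)
        rw [ht] at h2
        rw [h2] at h1
        exact h1
      rw [pvIdxN_hdr_cons hd t n hhd, pvIdxN_cons t (n + 1) hd2 t2 hdw]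
      have hm : pvIdxN t2 (n + 1 + (t.takeWhile pvNH).length + 1)
          = pvIdxN t2 ((n + 1 + (t.takeWhile pvNH).length) + 1) := rfl
      rw [hm, ← pvIdxN_hdr_cons hd2 t2 (n + 1 + (t.takeWhile pvNH).length) hhd2]
      have IH := ih t2 hlen2 hd2 (n + 1 + (t.takeWhile pvNH).length) hhd2 hdrop2
      cases hY : pvIdxN (hd2 :: t2) (n + 1 + (t.takeWhile pvNH).length) with
      | nil =>
        exfalso
        rw [pvIdxN_hdr_cons hd2 t2 _ hhd2] at hY
        exact absurd hY (List.cons_ne_nil _ _)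
      | cons y ys =>
        have hy : y = n + 1 + (t.takeWhile pvNH).length := by
          rw [pvIdxN_hdr_cons hd2 t2 _ hhd2] at hY
          exact (List.cons.injEq _ _ _ _ ▸ hY).1.symm
        rw [hY] at IH
        simp only [List.map_cons, List.tail_cons, List.zip_cons_cons, List.cons_append]
        rw [pvSections_cons, hdw]
        apply congrArg₂ List.cons
        · -- head chunk: lines[n : m] = hd :: takeWhile
          rw [hy, PySem.List.slice_natCast]
          rw [show n + 1 + (t.takeWhile pvNH).length - n = (t.takeWhile pvNH).length + 1 by omega]
          rw [hdrop]
          have h3 := List.take_left (l₁ := t.takeWhile pvNH) (l₂ := hd2 :: t2)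
          rw [ht] at h3
          rw [List.take_succ_cons, h3]
        · simp only [List.map_cons, List.tail_cons] at IH
          exact IH

lemma pv_resolve_snd (cur : Option String) (chunks : List (List String)) :
    (pvResolve cur chunks).map Prod.snd = chunks := by
  induction chunks generalizing cur with
  | nil => rfl
  | cons s ss ih => simp [pvResolve, ih]

lemma pv_names (chunks : List (List String)) :
    ∀ (acc : List (Option String)) (cur : Option String),
    (chunks.foldl
      (fun (st : List (Option String) × Option String) chunk =>
        let parts := (PySem.Str.split? ((PySem.List.pyGet? chunk 0).getD "") " ").getD []
        let cur := if 3 ≤ parts.length then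
            some (PySem.Str.slice (parts.getD 2 "") (some 2) none) else st.2
        (st.1 ++ [cur], cur)) (acc, cur)).1
      = acc ++ (pvResolve cur chunks).map Prod.fst := by
  induction chunks with
  | nil => intro acc cur; simp [pvResolve]
  | cons s ss ih =>
    intro acc cur
    simp only [List.foldl_cons, pvResolve, pvParse, List.map_cons]
    rw [ih]
    simp

lemma pv_B_sections (diff_text : String) (dfo : Option (List String)) :
    preprocess_diff_alt diff_text dfo
      = (let df := dfo.getD ["pyproject.toml", "uv.lock"]
         let lines := PySem.Str.splitlines diff_text
         let kn := (pvResolve none (pvSections (lines.dropWhile pvNH))).foldl (pvStepG df)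
             (PySem.Dict.empty, false)
         (PySem.Str.join "\n" kn.1.values, kn.2)) := by
  unfold preprocess_diff_alt
  dsimp only
  rw [PySem.List.slice_from_one]
  have hstarts : ((PySem.List.enumerate (PySem.Str.splitlines diff_text)).filterMap
      (fun p => if PySem.Str.startswith p.2 "diff --git" then some p.1 else none))
      = pvIdxs (PySem.Str.splitlines diff_text) (((0 : Nat) : Int)) := rfl
  rw [hstarts, pv_idxN_cast _ _ le_rfl 0, pv_idxN_shift]
  simp only [Nat.zero_add]
  cases hdw : (PySem.Str.splitlines diff_text).dropWhile pvNH with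
  | nil =>
    rw [pvIdxN_nil _ _ (by simp)]
    rw [show pvSections [] = [] from by rw [pvSections]]
    simp [pvResolve]
  | cons hd t2 =>
    have hhd : pvHdr hd = true := by
      simpa [pvNH] using pv_dropWhile_head pvNH (PySem.Str.splitlines diff_text) hd t2 hdw
    have hdrop : (PySem.Str.splitlines diff_text).drop
        ((PySem.Str.splitlines diff_text).takeWhile pvNH).length = hd :: t2 := by
      have h := List.drop_left (l₁ := (PySem.Str.splitlines diff_text).takeWhile pvNH)
        (l₂ := (PySem.Str.splitlines diff_text).dropWhile pvNH)
      rw [List.takeWhile_append_dropWhile] at h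
      rw [h, hdw]
    rw [pv_SEC (PySem.Str.splitlines diff_text) t2.length t2 le_rfl hd _ hhd hdrop]
    rw [pv_names (pvSections (hd :: t2)) [] none]
    simp only [List.nil_append]
    have hz : (((pvResolve none (pvSections (hd :: t2))).map Prod.fst).zip
        (pvSections (hd :: t2))) = pvResolve none (pvSections (hd :: t2)) := by
      nth_rewrite 2 [← pv_resolve_snd none (pvSections (hd :: t2))]
      exact Eq.symm (List.zip_of_prod rfl rfl)
    rw [hz]
    rfl

-- ===== VERDICT (by name: the statement is the Claim_ definition above) =====
theorem preprocess_diff_spec : Claim_equal_preprocess_diff := by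
  intro diff_text dfo _
  unfold Spec_preprocess_diff
  rw [pv_A_sections, pv_B_sections]
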